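-- pv_equiv track=rewrite | github.com/ivantohelpyou/spawn-experiments | experiments/1.501.1-email-validator-severed-branch/3-test-first-development/email_validator.py | _validate_local_part
-- ===== SOURCE A (Python) =====
-- LOCAL_PART_ALLOWED_CHARS = set('abcdefghijklmnopqrstuvwxyzABCDEFGHIJKLMNOPQRSTUVWXYZ0123456789._-+')
--
-- def _validate_local_part(local_part: str) -> bool:
--     """Validate the local part of an email address (before @)"""
--     # Check length constraints
--     if len(local_part) == 0 or len(local_part) > 64:
--         return False
--
--     # Check allowed characters: a-z, A-Z, 0-9, ., _, -, +
--     if not all(c in LOCAL_PART_ALLOWED_CHARS for c in local_part):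
--         return False
--
--     # Dot rules: cannot start or end with dot, no consecutive dots
--     if local_part.startswith('.') or local_part.endswith('.'):
--         return False
--
--     if '..' in local_part:
--         return False
--
--     # Hyphen rules: cannot start or end with hyphen
--     if local_part.startswith('-') or local_part.endswith('-'):
--         return False
--
--     return True
-- ===== SOURCE B (Python) =====
-- LOCAL_PART_ALLOWED_CHARS = frozenset('abcdefghijklmnopqrstuvwxyzABCDEFGHIJKLMNOPQRSTUVWXYZ0123456789._-+')
--
-- def _validate_local_part(local_part: str) -> bool:
--     """Validate the local part of an email address (before @): single pass."""
--     n = len(local_part)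
--     if n == 0 or n > 64:
--         return False
--     # boundary rule: must not start or end with '.' or '-'
--     if local_part[0] in '.-' or local_part[-1] in '.-':
--         return False
--     # one traversal: allowed characters and no consecutive dots (prev-char state)
--     prev = ''
--     for c in local_part:
--         if c not in LOCAL_PART_ALLOWED_CHARS:
--             return False
--         if c == '.' and prev == '.':
--             return False
--         prev = c
--     return True
-- ===== Notes on version B (the rewrite author's own statement) =====
-- stated objective: alternative
-- what changed: Replaces A's four separate scans (all-comprehension over an allowed set, startswith/endswith '.', '..' substring search, startswith/endswith '-') by one boundary check on the first/last character plus a single pass that tracks the previous character to reject disallowed characters and consecutive dots.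
import Mathlib
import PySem

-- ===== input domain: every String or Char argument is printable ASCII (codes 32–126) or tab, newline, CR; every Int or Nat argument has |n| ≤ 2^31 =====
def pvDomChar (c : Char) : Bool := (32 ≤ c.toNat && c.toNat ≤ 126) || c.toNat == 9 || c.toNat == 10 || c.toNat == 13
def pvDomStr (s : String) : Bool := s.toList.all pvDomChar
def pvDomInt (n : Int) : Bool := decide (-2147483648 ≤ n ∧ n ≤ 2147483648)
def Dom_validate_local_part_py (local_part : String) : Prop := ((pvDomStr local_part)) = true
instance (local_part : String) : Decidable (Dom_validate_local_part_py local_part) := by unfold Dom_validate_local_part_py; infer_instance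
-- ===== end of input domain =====

-- B replaces A's four separate scans (allowed-set comprehension, startswith/endswith '.',
-- '..' substring search, startswith/endswith '-') by a first/last-character check plus one
-- prev-char-tracking pass; same return value, no speed claim.

-- ===== PORT A =====
def LOCAL_PART_ALLOWED_CHARS : PySem.Set Char :=
  PySem.Set.ofList "abcdefghijklmnopqrstuvwxyzABCDEFGHIJKLMNOPQRSTUVWXYZ0123456789._-+".toList

def validate_local_part_py (local_part : String) : Bool :=
  if PySem.Str.len local_part == 0 || PySem.Str.len local_part > 64 then false
  else if !(local_part.toList.all (fun c => PySem.Set.contains LOCAL_PART_ALLOWED_CHARS c)) then false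
  else if PySem.Str.startswith local_part "." || PySem.Str.endswith local_part "." then false
  else if PySem.Str.isIn ".." local_part then false
  else if PySem.Str.startswith local_part "-" || PySem.Str.endswith local_part "-" then false
  else true

-- ===== PORT B =====
def pvAllowedB (c : Char) : Bool :=
  "abcdefghijklmnopqrstuvwxyzABCDEFGHIJKLMNOPQRSTUVWXYZ0123456789._-+".toList.contains c

-- the for-loop of Source B; prev = none models Python's initial prev = ''
def pvScan : List Char → Option Char → Bool
  | [], _ => true
  | c :: rest, prev =>
      if !(pvAllowedB c) then false
      else if c == '.' && prev == some '.' then false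
      else pvScan rest (some c)

def validate_local_part_py_alt (local_part : String) : Bool :=
  let n := PySem.Str.len local_part
  if n == 0 || n > 64 then false
  else if (PySem.Str.pyGet? local_part 0 == some '.' || PySem.Str.pyGet? local_part 0 == some '-')
       || (PySem.Str.pyGet? local_part (-1) == some '.' || PySem.Str.pyGet? local_part (-1) == some '-') then false
  else pvScan local_part.toList none

-- ===== PRECONDITION & SPEC =====
def Spec_validate_local_part_py (local_part : String) (out : Bool) : Prop := out = validate_local_part_py_alt local_part
instance (local_part : String) (out : Bool) : Decidable (Spec_validate_local_part_py local_part out) := by unfold Spec_validate_local_part_py; infer_instance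

-- ===== CLAIM (what is proved, stated in full; the proofs are below) =====
def Claim_equal_validate_local_part_py : Prop := ∀ (local_part : String), Dom_validate_local_part_py local_part → Spec_validate_local_part_py local_part (validate_local_part_py local_part)

-- ===== LEMMAS AND PROOFS =====

-- "no consecutive dots" as a structural recursion (proof-side characterisation of A's '..' scan)
def pvDdfree : List Char → Bool
  | [] => true
  | [_] => true
  | a :: b :: r => !(a == '.' && b == '.') && pvDdfree (b :: r)

theorem pvAllowed_eq (c : Char) :
    PySem.Set.contains LOCAL_PART_ALLOWED_CHARS c = pvAllowedB c := by
  unfold LOCAL_PART_ALLOWED_CHARS pvAllowedB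
  simp only [PySem.Set.contains_eq_listContains, List.contains_eq_mem]
  exact decide_eq_decide.mpr (PySem.Set.mem_ofList _ _)

theorem pvScan_some (cs : List Char) (prev : Char) :
    pvScan cs (some prev) = (cs.all pvAllowedB && pvDdfree (prev :: cs)) := by
  induction cs generalizing prev with
  | nil => simp [pvScan, pvDdfree]
  | cons c rest ih =>
      simp only [pvScan, ih, List.all_cons, pvDdfree]
      cases e1 : pvAllowedB c <;> cases e2 : c == '.' <;> cases e3 : prev == '.' <;>
        simp_all [Bool.and_comm]

theorem pvScan_none (cs : List Char) :
    pvScan cs none = (cs.all pvAllowedB && pvDdfree cs) := by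
  cases cs with
  | nil => simp [pvScan, pvDdfree]
  | cons c rest =>
      simp only [pvScan, pvScan_some, List.all_cons]
      by_cases h1 : pvAllowedB c <;> simp [h1]

theorem pvDd_infix (cs : List Char) : (['.', '.'] <:+: cs) ↔ pvDdfree cs = false := by
  induction cs with
  | nil => simp [pvDdfree]
  | cons c rest ih =>
      rw [List.infix_cons_iff]
      cases rest with
      | nil => simp [pvDdfree, List.prefix_cons_iff]
      | cons b r =>
          constructor
          · rintro (h | h)
            · rw [List.cons_prefix_cons] at h
              obtain ⟨rfl, h2⟩ := h
              rw [List.cons_prefix_cons] at h2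
              simp [pvDdfree, h2.1.symm]
            · simp [pvDdfree, ih.mp h]
          · intro h
            rcases Bool.and_eq_false_iff.mp h with h1 | h1
            · left
              simp only [Bool.not_eq_false', Bool.and_eq_true, beq_iff_eq] at h1
              rw [h1.1, h1.2]
              exact List.cons_prefix_cons.mpr ⟨rfl, List.cons_prefix_cons.mpr ⟨rfl, List.nil_prefix⟩⟩
            · right; exact ih.mpr h1

theorem pvSingleton_prefix (cs : List Char) (a : Char) : ([a] <+: cs) ↔ cs.head? = some a := by
  cases cs <;> simp [List.cons_prefix_cons, eq_comm]

theorem pvSingleton_suffix (cs : List Char) (a : Char) : ([a] <:+ cs) ↔ cs.getLast? = some a := by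
  constructor
  · rintro ⟨t, rfl⟩; simp
  · intro h
    rcases List.eq_nil_or_concat cs with rfl | ⟨t, b, rfl⟩
    · simp at h
    · simp at h; simp [h]

theorem pvGetNeg1 (cs : List Char) (h : cs ≠ []) : PySem.List.pyGet? cs (-1) = cs.getLast? := by
  simp only [PySem.List.pyGet?, PySem.List.pyIdx?, Int.reduceNeg, Int.neg_nonneg, Int.reduceLE,
    reduceIte, neg_le_neg_iff, Nat.one_le_cast, neg_neg, Int.toNat_one]
  have hl : 1 ≤ cs.length := List.length_pos_iff.mpr h
  simp [hl, List.getLast?_eq_getElem?]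

theorem pvMain (s : String) : validate_local_part_py s = validate_local_part_py_alt s := by
  unfold validate_local_part_py validate_local_part_py_alt
  simp only [PySem.Str.len_eq]
  split
  next hg => rfl
  next hg =>
    have hne : s.toList ≠ [] := by
      intro h0; apply hg; simp [h0]
    obtain ⟨hd, hh⟩ : ∃ a, s.toList.head? = some a := ⟨_, List.head?_eq_some_head hne⟩
    obtain ⟨lst, hl⟩ : ∃ a, s.toList.getLast? = some a := ⟨_, List.getLast?_eq_some_getLast hne⟩
    have hswd : PySem.Str.startswith s "." = (hd == '.') := by
      apply Bool.eq_iff_iff.mpr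
      rw [PySem.Str.startswith_eq, show ("." : String).toList = ['.'] from rfl,
        PySem.Chars.startswith_iff, pvSingleton_prefix, hh]
      simp
    have hswh : PySem.Str.startswith s "-" = (hd == '-') := by
      apply Bool.eq_iff_iff.mpr
      rw [PySem.Str.startswith_eq, show ("-" : String).toList = ['-'] from rfl,
        PySem.Chars.startswith_iff, pvSingleton_prefix, hh]
      simp
    have hewd : PySem.Str.endswith s "." = (lst == '.') := by
      apply Bool.eq_iff_iff.mpr
      rw [PySem.Str.endswith_eq, show ("." : String).toList = ['.'] from rfl,
        PySem.Chars.endswith_iff, pvSingleton_suffix, hl]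
      simp
    have hewh : PySem.Str.endswith s "-" = (lst == '-') := by
      apply Bool.eq_iff_iff.mpr
      rw [PySem.Str.endswith_eq, show ("-" : String).toList = ['-'] from rfl,
        PySem.Chars.endswith_iff, pvSingleton_suffix, hl]
      simp
    have hdd : PySem.Str.isIn ".." s = !pvDdfree s.toList := by
      apply Bool.eq_iff_iff.mpr
      rw [PySem.Str.isIn_iff_infix, show (".." : String).toList = ['.', '.'] from rfl,
        pvDd_infix]
      simp
    have hget0 : PySem.Str.pyGet? s 0 = some hd := by
      rw [show (0 : Int) = ((0 : Nat) : Int) from rfl, PySem.Str.pyGet?_natCast]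
      simpa [← List.head?_eq_getElem?] using hh
    have hgetm1 : PySem.Str.pyGet? s (-1) = some lst := by
      rw [PySem.Str.pyGet?_eq, PySem.Chars.pyGet?_eq_listPyGet?, pvGetNeg1 _ hne, hl]
    have hall : (s.toList.all fun c => PySem.Set.contains LOCAL_PART_ALLOWED_CHARS c)
        = s.toList.all pvAllowedB := by
      simp only [pvAllowed_eq]
    rw [hswd, hswh, hewd, hewh, hdd, hget0, hgetm1, hall, pvScan_none]
    generalize s.toList.all pvAllowedB = A
    generalize pvDdfree s.toList = D
    cases A <;> cases D <;>
      by_cases h1 : hd = '.' <;> by_cases h2 : hd = '-' <;> by_cases h3 : lst = '.' <;>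
        by_cases h4 : lst = '-' <;> simp [h1, h2, h3, h4]

-- ===== VERDICT (by name: the statement is the Claim_ definition above) =====
theorem validate_local_part_py_spec : Claim_equal_validate_local_part_py := by
  intro s _
  unfold Spec_validate_local_part_py
  exact pvMain s
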